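-- pv_equiv track=rewrite | github.com/bthornemail/atomic-kernel-v1 | dev-docs/prototype/atomic-kernel/atomic_kernel/stream.py | encode_to_control_stream
-- ===== SOURCE A (Python) =====
-- from typing import Any, Dict, List, Sequence
--
-- def _cp_to_digits(cp: int) -> List[int]:
--     if cp == 0:
--         return [0]
--     out: List[int] = []
--     n = cp
--     while n > 0:
--         n, d = divmod(n, 60)
--         out.append(d)
--     return list(reversed(out))
--
-- def encode_to_control_stream(message: str) -> List[int]:
--     """Encode text into base-60 control digits, separated by FS (0x1C)."""
--     digits: List[int] = []
--     for ch in message: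
--         cp = ord(ch)
--         digits.extend(_cp_to_digits(cp))
--         digits.append(0x1C)
--     if digits and digits[-1] == 0x1C:
--         digits.pop()
--     return digits
-- ===== SOURCE B (Python) =====
-- from typing import List
--
-- def _digits60(cp: int) -> List[int]:
--     return [cp] if cp < 60 else _digits60(cp // 60) + [cp % 60]
--
-- def encode_to_control_stream(message: str) -> List[int]:
--     groups = [_digits60(ord(ch)) for ch in message]
--     out: List[int] = []
--     for i, g in enumerate(groups):
--         if i:
--             out.append(0x1C)
--         out.extend(g)
--     return out
-- ===== Notes on version B (the rewrite author's own statement) =====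
-- stated objective: simpler
-- what changed: B converts each codepoint with a short recursive base-60 function (no reverse step) and joins the per-character digit groups by inserting the FS separator before every group except the first, instead of A's append-separator-after-each-then-trim-trailing pass.
import Mathlib
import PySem

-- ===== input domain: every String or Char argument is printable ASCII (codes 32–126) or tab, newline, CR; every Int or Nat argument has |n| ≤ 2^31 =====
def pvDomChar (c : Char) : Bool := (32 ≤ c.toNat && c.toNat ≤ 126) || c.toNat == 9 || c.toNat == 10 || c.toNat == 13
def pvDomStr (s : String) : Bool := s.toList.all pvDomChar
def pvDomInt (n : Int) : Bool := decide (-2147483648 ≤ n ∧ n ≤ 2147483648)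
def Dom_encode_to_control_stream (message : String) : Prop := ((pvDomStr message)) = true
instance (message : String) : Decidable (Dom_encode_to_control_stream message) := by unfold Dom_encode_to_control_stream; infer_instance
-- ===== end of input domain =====

-- B joins per-character base-60 digit groups with the FS separator placed before every
-- group but the first (no trailing-separator trim), using a recursive digit conversion.

-- ===== PORT A =====
-- the 'while n > 0' loop of _cp_to_digits, accumulating digits low-to-high
def cpLoop (n : Int) (out : List Int) : List Int :=
  if 0 < n then
    cpLoop (PySem.Int.floordiv n 60) (out ++ [PySem.Int.mod n 60])
  else out
termination_by n.toNat
decreasing_by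
  rw [PySem.Int.floordiv_eq_ediv_of_pos (by norm_num : (0:Int) < 60)]
  omega

def cp_to_digits (cp : Int) : List Int :=
  if cp = 0 then [0] else (cpLoop cp []).reverse

def encode_to_control_stream (message : String) : List Int :=
  let digits := message.toList.foldl
    (fun acc ch => (acc ++ cp_to_digits (ch.toNat : Int)) ++ [28]) []
  if digits ≠ [] ∧ PySem.List.pyGet? digits (-1) = some 28 then digits.dropLast else digits

-- ===== PORT B =====
def digits60 (cp : Int) : List Int :=
  if cp < 60 then [cp]
  else digits60 (PySem.Int.floordiv cp 60) ++ [PySem.Int.mod cp 60]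
termination_by cp.toNat
decreasing_by
  rw [PySem.Int.floordiv_eq_ediv_of_pos (by norm_num : (0:Int) < 60)]
  omega

def encode_to_control_stream_alt (message : String) : List Int :=
  let groups := message.toList.map (fun ch => digits60 (ch.toNat : Int))
  (PySem.List.enumerate groups 0).foldl
    (fun out ig => (if ig.1 ≠ 0 then out ++ [28] else out) ++ ig.2) []

-- ===== PRECONDITION & SPEC =====
def Spec_encode_to_control_stream (message : String) (out : List Int) : Prop := out = encode_to_control_stream_alt message
instance (message : String) (out : List Int) : Decidable (Spec_encode_to_control_stream message out) := by unfold Spec_encode_to_control_stream; infer_instance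

-- ===== CLAIM (what is proved, stated in full; the proofs are below) =====
def Claim_equal_encode_to_control_stream : Prop := ∀ (message : String), Dom_encode_to_control_stream message → Spec_encode_to_control_stream message (encode_to_control_stream message)

-- ===== LEMMAS AND PROOFS =====

lemma cpLoop_eq_digits60 (k : Nat) :
    ∀ (n : Int) (out : List Int), n.toNat ≤ k → 0 < n →
      cpLoop n out = out ++ (digits60 n).reverse := by
  induction k with
  | zero => intro n out hk hn; omega
  | succ k ih =>
    intro n out hk hn
    rw [cpLoop]
    simp only [hn, if_pos]
    have h60 : (0:Int) < 60 := by norm_num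
    have hq : PySem.Int.floordiv n 60 = n / 60 := PySem.Int.floordiv_eq_ediv_of_pos h60
    have hr : PySem.Int.mod n 60 = n % 60 := PySem.Int.mod_eq_emod_of_pos h60
    by_cases hqq : 0 < n / 60
    · -- n >= 60 : recursive case on both sides
      have hge : ¬ n < 60 := by omega
      rw [ih (PySem.Int.floordiv n 60) _ (by rw [hq]; omega) (by rw [hq]; omega)]
      have hd : digits60 n = digits60 (n / 60) ++ [n % 60] := by
        rw [digits60, if_neg hge, hq, hr]
      rw [hd, hq, hr]
      simp
    · -- n < 60 : loop stops, digits60 gives the single digit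
      have hlt : n < 60 := by omega
      rw [cpLoop]
      have hstop : ¬ (0 < PySem.Int.floordiv n 60) := by rw [hq]; omega
      rw [if_neg hstop, digits60, if_pos hlt, hr]
      have : n % 60 = n := by omega
      simp [this]

lemma cp_to_digits_eq (cp : Int) (h : 0 ≤ cp) : cp_to_digits cp = digits60 cp := by
  unfold cp_to_digits
  by_cases h0 : cp = 0
  · subst h0; rw [digits60]; norm_num
  · have hpos : 0 < cp := by omega
    rw [if_neg h0, cpLoop_eq_digits60 cp.toNat cp [] le_rfl hpos]
    simp

-- flat encodings of A's loop body and of B's joined groups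
def Fenc (l : List Char) : List Int := l.flatMap (fun ch => digits60 (ch.toNat : Int) ++ [28])
def Genc (l : List Char) : List Int := l.flatMap (fun ch => 28 :: digits60 (ch.toNat : Int))

lemma foldA_eq (l : List Char) : ∀ acc : List Int,
    l.foldl (fun acc ch => (acc ++ cp_to_digits (ch.toNat : Int)) ++ [28]) acc
      = acc ++ Fenc l := by
  induction l with
  | nil => intro acc; simp [Fenc]
  | cons ch l ih =>
    intro acc
    simp only [List.foldl_cons, ih, Fenc, List.flatMap_cons,
      cp_to_digits_eq (ch.toNat : Int) (by positivity)]
    simp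

lemma foldB_eq (gs : List Char) : ∀ (s : Int) (acc : List Int), 1 ≤ s →
    (PySem.List.enumerate (gs.map (fun ch => digits60 (ch.toNat : Int))) s).foldl
        (fun out ig => (if ig.1 ≠ 0 then out ++ [28] else out) ++ ig.2) acc
      = acc ++ Genc gs := by
  induction gs with
  | nil => intro s acc _; simp [Genc, PySem.List.enumerate_nil]
  | cons ch l ih =>
    intro s acc hs
    simp only [List.map_cons, PySem.List.enumerate_cons, List.foldl_cons]
    rw [ih (s + 1) _ (by omega)]
    have : s ≠ 0 := by omega
    simp [this, Genc]

lemma Fenc_shift (l : List Char) : ∀ p : List Int,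
    (p ++ [28]) ++ Fenc l = (p ++ Genc l) ++ [28] := by
  induction l with
  | nil => intro p; simp [Fenc, Genc]
  | cons ch l ih =>
    intro p
    have := ih (p ++ 28 :: digits60 (ch.toNat : Int))
    simp only [Fenc, Genc, List.flatMap_cons] at *
    simp only [List.append_assoc] at *
    simpa using this

-- ===== VERDICT (by name: the statement is the Claim_ definition above) =====
theorem encode_to_control_stream_spec : Claim_equal_encode_to_control_stream := by
  intro message _
  unfold Spec_encode_to_control_stream encode_to_control_stream encode_to_control_stream_alt
  cases hml : message.toList with
  | nil => simp [PySem.List.enumerate_nil]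
  | cons ch l =>
    simp only [List.foldl_cons, List.map_cons, PySem.List.enumerate_cons, List.foldl_cons]
    rw [foldA_eq, show (0:Int)+1 = 1 from rfl, foldB_eq l 1 _ (le_refl 1)]
    have hF : ([] ++ cp_to_digits (ch.toNat : Int)) ++ [28] ++ Fenc l
        = (([] ++ cp_to_digits (ch.toNat : Int)) ++ Genc l) ++ [28] := Fenc_shift l _
    rw [hF]
    have hne : (([] ++ cp_to_digits (ch.toNat : Int)) ++ Genc l) ++ [28] ≠ ([] : List Int) := by
      simp
    rw [if_pos ⟨hne, PySem.List.pyGet?_neg_one_append_singleton _ _⟩, List.dropLast_concat]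
    simp [cp_to_digits_eq (ch.toNat : Int) (by positivity)]
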